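-- pv_equiv track=rewrite | github.com/jhmarryme/Python-in-action | inbox/2024_company_algorithm/A16_爆炸蔓延/entry.py | blowUp
-- ===== SOURCE A (Python) =====
-- def blowUp(inArr):
--     n = len(inArr)
--     destroyed = [False] * n  # 记录树桩是否已经被摧毁
--     result = []  # 记录需要爆破的树桩索引
--     indices = list(range(n))  # 存储树桩的索引
--
--     # 按照树桩的高度从高到低排序
--     indices.sort(key=lambda x: -inArr[x])
--
--     for idx in indices:
--         if destroyed[idx]:
--             continue  # 如果该树桩已经被摧毁，跳过
--
--         # 将当前树桩加入结果，注意结果要求的是1开始的索引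
--         result.append(idx + 1)
--
--         # 向左摧毁
--         left = idx - 1
--         while left >= 0 and inArr[left] < inArr[left + 1] and not destroyed[left]:
--             destroyed[left] = True
--             left -= 1
--
--         # 向右摧毁
--         right = idx + 1
--         while right < n and inArr[right] < inArr[right - 1] and not destroyed[right]:
--             destroyed[right] = True
--             right += 1
--
--         # 标记当前树桩为已摧毁
--         destroyed[idx] = True
--
--     result.sort()  # 按照索引升序输出
--     return result
-- ===== SOURCE B (Python) =====
-- def blowUp(inArr):
--     n = len(inArr)
--     return [i + 1 for i in range(n)
--             if (i == 0 or inArr[i] >= inArr[i - 1])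
--             and (i == n - 1 or inArr[i] >= inArr[i + 1])]
-- ===== Notes on version B (the rewrite author's own statement) =====
-- stated objective: faster
-- what changed: Replaces the sort-by-height plus sequential directional-destruction simulation with a single linear neighbor-comparison scan that emits the 1-based indices of local maxima (>= both neighbors, array ends counting as -infinity), already in ascending order.
import Mathlib
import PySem

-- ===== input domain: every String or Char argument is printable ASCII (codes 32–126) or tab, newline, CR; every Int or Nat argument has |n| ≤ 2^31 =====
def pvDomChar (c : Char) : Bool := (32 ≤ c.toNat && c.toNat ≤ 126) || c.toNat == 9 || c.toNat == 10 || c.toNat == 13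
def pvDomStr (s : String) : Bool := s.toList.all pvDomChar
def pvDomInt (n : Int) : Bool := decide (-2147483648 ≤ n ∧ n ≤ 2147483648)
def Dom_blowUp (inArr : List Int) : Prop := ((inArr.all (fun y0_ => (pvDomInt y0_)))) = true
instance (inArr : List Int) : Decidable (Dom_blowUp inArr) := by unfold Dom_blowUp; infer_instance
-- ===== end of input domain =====

-- B replaces A's sort-by-height + directional-destruction simulation by one linear
-- neighbour-comparison scan emitting the 1-based indices of local maxima (objective: faster).


-- ===== PORT A =====
-- `while left >= 0 and inArr[left] < inArr[left+1] and not destroyed[left]: …` (fuel makes it total;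
-- fuel = len(inArr) is never exhausted, the walk moves left one step per iteration)
def blowUpLeft (inArr : List Int) (fuel : Nat) (left : Int) (destroyed : List Bool) : List Bool :=
  match fuel with
  | 0 => destroyed
  | fuel + 1 =>
    if 0 ≤ left ∧ PySem.List.pyGetD inArr left 0 < PySem.List.pyGetD inArr (left + 1) 0
        ∧ ¬(PySem.List.pyGetD destroyed left false = true) then
      blowUpLeft inArr fuel (left - 1) (PySem.List.pySetD destroyed left true)
    else destroyed

-- `while right < n and inArr[right] < inArr[right-1] and not destroyed[right]: …`
def blowUpRight (inArr : List Int) (fuel : Nat) (right : Int) (destroyed : List Bool) : List Bool :=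
  match fuel with
  | 0 => destroyed
  | fuel + 1 =>
    if right < (inArr.length : Int) ∧ PySem.List.pyGetD inArr right 0 < PySem.List.pyGetD inArr (right - 1) 0
        ∧ ¬(PySem.List.pyGetD destroyed right false = true) then
      blowUpRight inArr fuel (right + 1) (PySem.List.pySetD destroyed right true)
    else destroyed

-- body of `for idx in indices:`
def blowUpStep (inArr : List Int) (st : List Bool × List Int) (idx : Int) : List Bool × List Int :=
  if PySem.List.pyGetD st.1 idx false = true then st
  else
    let result := st.2 ++ [idx + 1]
    let destroyed := blowUpLeft inArr inArr.length (idx - 1) st.1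
    let destroyed := blowUpRight inArr inArr.length (idx + 1) destroyed
    let destroyed := PySem.List.pySetD destroyed idx true
    (destroyed, result)

def blowUp (inArr : List Int) : List Int :=
  let n : Int := inArr.length
  let destroyed := List.replicate inArr.length false
  let indices := PySem.List.sorted (PySem.List.pyRange 0 n 1)
      (fun x => -(PySem.List.pyGetD inArr x 0)) false
  let st := indices.foldl (blowUpStep inArr) (destroyed, [])
  PySem.List.sorted st.2 (fun x => x) false

-- ===== PORT B =====
def blowUp_alt (inArr : List Int) : List Int :=
  let n : Int := inArr.length
  ((PySem.List.pyRange 0 n 1).filter (fun i =>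
      (i == 0 || decide (PySem.List.pyGetD inArr (i - 1) 0 ≤ PySem.List.pyGetD inArr i 0)) &&
      (i == n - 1 || decide (PySem.List.pyGetD inArr (i + 1) 0 ≤ PySem.List.pyGetD inArr i 0)))).map
    (fun i => i + 1)

-- ===== PRECONDITION & SPEC =====
def Spec_blowUp (inArr : List Int) (out : List Int) : Prop := out = blowUp_alt inArr
instance (inArr : List Int) (out : List Int) : Decidable (Spec_blowUp inArr out) := by unfold Spec_blowUp; infer_instance

-- ===== CLAIM (what is proved, stated in full; the proofs are below) =====
def Claim_equal_blowUp : Prop := ∀ (inArr : List Int), Dom_blowUp inArr → Spec_blowUp inArr (blowUp inArr)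

-- ===== LEMMAS AND PROOFS =====

-- value of stump i (A only reads indices 0 ≤ i < n)
def pvV (xs : List Int) (i : Int) : Int := PySem.List.pyGetD xs i 0
-- destroyed-flag read
def pvGB (d : List Bool) (i : Int) : Bool := PySem.List.pyGetD d i false
-- strictly increasing consecutive run from p up to j
def pvUp (xs : List Int) (p j : Int) : Prop := ∀ k : Int, p ≤ k → k < j → pvV xs k < pvV xs (k + 1)
-- strictly decreasing consecutive run from j down to p (rightwards)
def pvDn (xs : List Int) (j p : Int) : Prop := ∀ k : Int, j < k → k ≤ p → pvV xs k < pvV xs (k - 1)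
-- p lies on a strict slope leading up to j
def pvChain (xs : List Int) (p j : Int) : Prop := (p < j ∧ pvUp xs p j) ∨ (j < p ∧ pvDn xs j p)
-- local maximum (boolean and propositional forms)
def pvLocB (xs : List Int) (i : Int) : Bool :=
  (i == 0 || decide (PySem.List.pyGetD xs (i - 1) 0 ≤ PySem.List.pyGetD xs i 0)) &&
  (i == (xs.length : Int) - 1 || decide (PySem.List.pyGetD xs (i + 1) 0 ≤ PySem.List.pyGetD xs i 0))
def pvLoc (xs : List Int) (i : Int) : Prop :=
  (i = 0 ∨ pvV xs (i - 1) ≤ pvV xs i) ∧ (i = (xs.length : Int) - 1 ∨ pvV xs (i + 1) ≤ pvV xs i)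

theorem pvLocB_iff (xs : List Int) (i : Int) : pvLocB xs i = true ↔ pvLoc xs i := by
  simp [pvLocB, pvLoc, pvV]

-- the destroyed-array invariant: a stump is destroyed iff it is a processed local maximum
-- or lies on a strict slope up to a processed local maximum
def pvInv (xs : List Int) (P : List Int) (d : List Bool) : Prop :=
  ∀ p : Int, 0 ≤ p → p < (xs.length : Int) →
    (pvGB d p = true ↔
      (pvLoc xs p ∧ p ∈ P) ∨
      ∃ j : Int, 0 ≤ j ∧ j < (xs.length : Int) ∧ j ∈ P ∧ pvLoc xs j ∧ pvChain xs p j)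

theorem pvGB_set (d : List Bool) (l p : Int) (hl : 0 ≤ l) (hln : l < (d.length : Int)) (hp : 0 ≤ p) :
    pvGB (PySem.List.pySetD d l true) p = if p = l then true else pvGB d p := by
  unfold pvGB
  rw [PySem.List.pySetD_of_nonneg _ _ hl, PySem.List.pyGetD_of_nonneg _ _ hp,
    List.getD_eq_getElem?_getD, List.getElem?_set]
  have hlt : l.toNat < d.length := by omega
  by_cases h : p = l
  · subst h; simp [hlt]
  · have : l.toNat ≠ p.toNat := by omega
    simp [this, ← List.getD_eq_getElem?_getD, PySem.List.pyGetD_of_nonneg _ _ hp, h]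

-- a local maximum has no strictly larger neighbour, hence no chain starts at it
theorem pv_loc_no_chain (xs : List Int) (i j : Int) (_hi0 : 0 ≤ i) (_hin : i < (xs.length : Int))
    (hj0 : 0 ≤ j) (hjn : j < (xs.length : Int)) (hloc : pvLoc xs i) (hc : pvChain xs i j) : False := by
  rcases hc with ⟨hij, hup⟩ | ⟨hji, hdn⟩
  · have h1 := hup i le_rfl hij
    rcases hloc.2 with h | h <;> omega
  · have h1 := hdn i hji le_rfl
    rcases hloc.1 with h | h <;> omega

-- an interior point of a strict up-run to idx cannot be destroyed under the invariant
theorem pv_left_blocked (xs : List Int) (P : List Int) (d : List Bool) (idx l p : Int)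
    (hInv : pvInv xs P d) (hidx0 : 0 ≤ idx) (hidxn : idx < (xs.length : Int))
    (hloc : pvLoc xs idx) (hidxP : idx ∉ P)
    (hl : 0 ≤ l) (hlt : l < idx) (hdl : pvGB d l = true)
    (hp : 0 ≤ p) (hpl : p < l) (hup : pvUp xs p idx) : False := by
  have hrhs := (hInv l hl (by omega)).mp hdl
  rcases hrhs with ⟨hlocl, hlP⟩ | ⟨j, hj0, hjn, hjP, hlocj, hchain⟩
  · have h1 := hup l (by omega) hlt
    rcases hlocl.2 with h | h <;> omega
  · have hjne : j ≠ idx := fun h => hidxP (h ▸ hjP)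
    rcases hchain with ⟨hlj, hupj⟩ | ⟨hjl, hdnj⟩
    · by_cases hji : j < idx
      · have h1 := hup j (by omega) hji
        rcases hlocj.2 with h | h <;> omega
      · have h1 := hupj idx (by omega) (by omega)
        rcases hloc.2 with h | h <;> omega
    · have h1 := hdnj l hjl le_rfl
      have h2 := hup (l - 1) (by omega) (by omega)
      simp only [sub_add_cancel] at h2
      omega

-- mirror image for the strict down-run right of idx
theorem pv_right_blocked (xs : List Int) (P : List Int) (d : List Bool) (idx r p : Int)
    (hInv : pvInv xs P d) (hidx0 : 0 ≤ idx) (hidxn : idx < (xs.length : Int))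
    (hloc : pvLoc xs idx) (hidxP : idx ∉ P)
    (hr : idx < r) (hrn : r < (xs.length : Int)) (hdr : pvGB d r = true)
    (hpn : p < (xs.length : Int)) (hpr : r < p) (hdn : pvDn xs idx p) : False := by
  have hrhs := (hInv r (by omega) hrn).mp hdr
  rcases hrhs with ⟨hlocr, hrP⟩ | ⟨j, hj0, hjn, hjP, hlocj, hchain⟩
  · have h1 := hdn r hr (by omega)
    rcases hlocr.1 with h | h <;> omega
  · have hjne : j ≠ idx := fun h => hidxP (h ▸ hjP)
    rcases hchain with ⟨hrj, hupj⟩ | ⟨hjr, hdnj⟩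
    · have h1 := hupj r le_rfl hrj
      have h2 := hdn (r + 1) (by omega) (by omega)
      simp only [add_sub_cancel_right] at h2
      omega
    · by_cases hji : idx < j
      · have h1 := hdn j hji (by omega)
        rcases hlocj.1 with h | h <;> omega
      · have h1 := hdnj idx (by omega) (by omega)
        rcases hloc.1 with h | h <;> omega

theorem pvUp_lt (xs : List Int) : ∀ m : Nat, ∀ p j : Int, (j - p).toNat ≤ m → p < j → pvUp xs p j → pvV xs p < pvV xs j := by
  intro m
  induction m with
  | zero => intro p j hm hpj _; omega
  | succ m ih =>
    intro p j hm hpj hup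
    by_cases h : p + 1 = j
    · subst h; exact hup p le_rfl hpj
    · have h2 : pvV xs p < pvV xs (p + 1) := hup p le_rfl hpj
      have h3 : pvV xs (p + 1) < pvV xs j := by
        apply ih (p + 1) j (by omega) (by omega)
        intro k hk1 hk2; exact hup k (by omega) hk2
      omega

theorem pvDn_lt (xs : List Int) : ∀ m : Nat, ∀ j p : Int, (p - j).toNat ≤ m → j < p → pvDn xs j p → pvV xs p < pvV xs j := by
  intro m
  induction m with
  | zero => intro j p hm hjp _; omega
  | succ m ih =>
    intro j p hm hjp hdn
    by_cases h : j + 1 = p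
    · have := hdn p hjp le_rfl; rw [← h] at *; simpa using this
    · have h2 : pvV xs p < pvV xs (p - 1) := hdn p hjp le_rfl
      have h3 : pvV xs (p - 1) < pvV xs j := by
        apply ih j (p - 1) (by omega) (by omega)
        intro k hk1 hk2; exact hdn k hk1 (by omega)
      omega

-- every stump with a strictly larger right neighbour has a strict up-run to a local maximum
theorem pv_exists_peak_right (xs : List Int) : ∀ m : Nat, ∀ i : Int, ((xs.length : Int) - i).toNat ≤ m →
    0 ≤ i → i + 1 < (xs.length : Int) → pvV xs i < pvV xs (i + 1) →
    ∃ j : Int, i < j ∧ j < (xs.length : Int) ∧ pvUp xs i j ∧ pvLoc xs j := by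
  intro m
  induction m with
  | zero => intro i hm _ h1 _; omega
  | succ m ih =>
    intro i hm hi0 hin hv
    by_cases hc : (i + 1 = (xs.length : Int) - 1 ∨ pvV xs (i + 1 + 1) ≤ pvV xs (i + 1))
    · refine ⟨i + 1, by omega, by omega, ?_, ?_, hc⟩
      · intro k hk1 hk2
        have hk : k = i := by omega
        subst hk; exact hv
      · refine Or.inr ?_
        simp only [add_sub_cancel_right]
        exact le_of_lt hv
    · push_neg at hc
      obtain ⟨j, hj1, hj2, hup, hloc⟩ := ih (i + 1) (by omega) (by omega) (by omega) hc.2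
      refine ⟨j, by omega, hj2, ?_, hloc⟩
      intro k hk1 hk2
      by_cases hk : k = i
      · subst hk; exact hv
      · exact hup k (by omega) hk2

theorem pv_exists_peak_left (xs : List Int) : ∀ m : Nat, ∀ i : Int, i.toNat ≤ m →
    1 ≤ i → i < (xs.length : Int) → pvV xs i < pvV xs (i - 1) →
    ∃ j : Int, 0 ≤ j ∧ j < i ∧ pvDn xs j i ∧ pvLoc xs j := by
  intro m
  induction m with
  | zero => intro i hm h1 _ _; omega
  | succ m ih =>
    intro i hm hi1 hin hv
    by_cases hc : (i - 1 = 0 ∨ pvV xs (i - 1 - 1) ≤ pvV xs (i - 1))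
    · refine ⟨i - 1, by omega, by omega, ?_, hc, ?_⟩
      · intro k hk1 hk2
        have hk : k = i := by omega
        subst hk; exact hv
      · refine Or.inr ?_
        simp only [sub_add_cancel]
        exact le_of_lt hv
    · push_neg at hc
      obtain ⟨j, hj1, hj2, hdn, hloc⟩ := ih (i - 1) (by omega) (by omega) (by omega) hc.2
      refine ⟨j, hj1, by omega, ?_, hloc⟩
      intro k hk1 hk2
      by_cases hk : k = i
      · subst hk; exact hv
      · exact hdn k hk1 (by omega)

-- the left destruction loop destroys exactly the strict up-run below idx
theorem blowUpLeft_spec (xs : List Int) (P : List Int) (d0 : List Bool) (idx : Int)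
    (hInv : pvInv xs P d0) (hidx0 : 0 ≤ idx) (hidxn : idx < (xs.length : Int))
    (hloc : pvLoc xs idx) (hidxP : idx ∉ P) :
    ∀ fuel : Nat, ∀ l : Int, ∀ d : List Bool, l < idx → (l + 1).toNat + 1 ≤ fuel →
    d.length = xs.length →
    (∀ p : Int, 0 ≤ p → p < (xs.length : Int) → (pvGB d p = true ↔ pvGB d0 p = true ∨ (l < p ∧ p < idx))) →
    (∀ k : Int, l < k → k < idx → pvV xs k < pvV xs (k + 1)) →
    (blowUpLeft xs fuel l d).length = xs.length ∧
    ∀ p : Int, 0 ≤ p → p < (xs.length : Int) →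
      (pvGB (blowUpLeft xs fuel l d) p = true ↔ pvGB d0 p = true ∨ (p < idx ∧ pvUp xs p idx)) := by
  intro fuel
  induction fuel with
  | zero => intro l d _ hf; omega
  | succ fuel ih =>
    intro l d hlt hf hlen H1 H2
    simp only [blowUpLeft]
    by_cases hg : 0 ≤ l ∧ PySem.List.pyGetD xs l 0 < PySem.List.pyGetD xs (l + 1) 0 ∧ ¬(PySem.List.pyGetD d l false = true)
    · rw [if_pos hg]
      obtain ⟨hl0, hvl, _⟩ := hg
      have hln : l < (d.length : Int) := by omega
      refine ih (l - 1) (PySem.List.pySetD d l true) (by omega) (by omega) ?_ ?_ ?_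
      · rw [PySem.List.pySetD_of_nonneg _ _ hl0, List.length_set]; exact hlen
      · intro p hp hpn
        rw [pvGB_set d l p hl0 hln hp]
        by_cases hpe : p = l
        · subst hpe; simp only [if_pos rfl]
          constructor
          · intro _; exact Or.inr (by omega)
          · intro _; rfl
        · rw [if_neg hpe]
          rw [H1 p hp hpn]
          constructor
          · rintro (h | h)
            · exact Or.inl h
            · exact Or.inr (by omega)
          · rintro (h | h)
            · exact Or.inl h
            · exact Or.inr (by omega)
      · intro k hk1 hk2
        by_cases hke : k = l
        · subst hke; exact hvl
        · exact H2 k (by omega) hk2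
    · rw [if_neg hg]
      refine ⟨hlen, ?_⟩
      intro p hp hpn
      rw [H1 p hp hpn]
      constructor
      · rintro (h | ⟨h1, h2⟩)
        · exact Or.inl h
        · exact Or.inr ⟨h2, fun k hk1 hk2 => H2 k (by omega) hk2⟩
      · rintro (h | ⟨hpidx, hup⟩)
        · exact Or.inl h
        · by_cases hlp : l < p
          · exact Or.inr ⟨hlp, hpidx⟩
          · push_neg at hg
            have hl0 : 0 ≤ l := by omega
            have hvll : pvV xs l < pvV xs (l + 1) := hup l (by omega) (by omega)
            have hdl : pvGB d l = true := hg hl0 hvll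
            have hd0l : pvGB d0 l = true := by
              rcases (H1 l hl0 (by omega)).mp hdl with h | h
              · exact h
              · omega
            by_cases hpe : p = l
            · subst hpe; exact Or.inl hd0l
            · exact (pv_left_blocked xs P d0 idx l p hInv hidx0 hidxn hloc hidxP hl0 (by omega) hd0l hp (by omega) hup).elim

-- the right destruction loop destroys exactly the strict down-run above idx
theorem blowUpRight_spec (xs : List Int) (P : List Int) (d0 dbase : List Bool) (idx : Int)
    (hInv : pvInv xs P d0) (hidx0 : 0 ≤ idx) (hidxn : idx < (xs.length : Int))
    (hloc : pvLoc xs idx) (hidxP : idx ∉ P)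
    (hbase : ∀ q : Int, idx < q → q < (xs.length : Int) → pvGB dbase q = pvGB d0 q) :
    ∀ fuel : Nat, ∀ r : Int, ∀ d : List Bool, idx < r → ((xs.length : Int) - r).toNat + 1 ≤ fuel →
    d.length = xs.length →
    (∀ p : Int, 0 ≤ p → p < (xs.length : Int) → (pvGB d p = true ↔ pvGB dbase p = true ∨ (idx < p ∧ p < r))) →
    (∀ k : Int, idx < k → k < r → pvV xs k < pvV xs (k - 1)) →
    (blowUpRight xs fuel r d).length = xs.length ∧
    ∀ p : Int, 0 ≤ p → p < (xs.length : Int) →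
      (pvGB (blowUpRight xs fuel r d) p = true ↔ pvGB dbase p = true ∨ (idx < p ∧ pvDn xs idx p)) := by
  intro fuel
  induction fuel with
  | zero => intro r d _ hf; omega
  | succ fuel ih =>
    intro r d hrt hf hlen H1 H2
    simp only [blowUpRight]
    by_cases hg : r < (xs.length : Int) ∧ PySem.List.pyGetD xs r 0 < PySem.List.pyGetD xs (r - 1) 0 ∧ ¬(PySem.List.pyGetD d r false = true)
    · rw [if_pos hg]
      obtain ⟨hrn, hvr, _⟩ := hg
      have hr0 : 0 ≤ r := by omega
      have hrln : r < (d.length : Int) := by omega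
      refine ih (r + 1) (PySem.List.pySetD d r true) (by omega) (by omega) ?_ ?_ ?_
      · rw [PySem.List.pySetD_of_nonneg _ _ hr0, List.length_set]; exact hlen
      · intro p hp hpn
        rw [pvGB_set d r p hr0 hrln hp]
        by_cases hpe : p = r
        · subst hpe; simp only [if_pos rfl]
          constructor
          · intro _; exact Or.inr (by omega)
          · intro _; rfl
        · rw [if_neg hpe]
          rw [H1 p hp hpn]
          constructor
          · rintro (h | h)
            · exact Or.inl h
            · exact Or.inr (by omega)
          · rintro (h | h)
            · exact Or.inl h
            · exact Or.inr (by omega)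
      · intro k hk1 hk2
        by_cases hke : k = r
        · subst hke; exact hvr
        · exact H2 k hk1 (by omega)
    · rw [if_neg hg]
      refine ⟨hlen, ?_⟩
      intro p hp hpn
      rw [H1 p hp hpn]
      constructor
      · rintro (h | ⟨h1, h2⟩)
        · exact Or.inl h
        · exact Or.inr ⟨h1, fun k hk1 hk2 => H2 k hk1 (by omega)⟩
      · rintro (h | ⟨hpidx, hdn⟩)
        · exact Or.inl h
        · by_cases hpr : p < r
          · exact Or.inr ⟨hpidx, hpr⟩
          · push_neg at hg
            have hrn : r < (xs.length : Int) := by omega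
            have hvrr : pvV xs r < pvV xs (r - 1) := hdn r (by omega) (by omega)
            have hdr : pvGB d r = true := hg hrn hvrr
            have hbr : pvGB dbase r = true := by
              rcases (H1 r (by omega) hrn).mp hdr with h | h
              · exact h
              · omega
            have hd0r : pvGB d0 r = true := (hbase r (by omega) hrn) ▸ hbr
            by_cases hpe : p = r
            · subst hpe; exact Or.inl hbr
            · exact (pv_right_blocked xs P d0 idx r p hInv hidx0 hidxn hloc hidxP (by omega) hrn hd0r hpn (by omega) hdn).elim

-- one iteration of the main loop: idx is appended iff it is a local maximum,
-- and the invariant is preserved with idx marked processed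
theorem blowUpStep_spec (xs : List Int) (P : List Int) (d : List Bool) (res : List Int) (idx : Int)
    (hInv : pvInv xs P d) (hlen : d.length = xs.length)
    (hidx0 : 0 ≤ idx) (hidxn : idx < (xs.length : Int)) (hidxP : idx ∉ P)
    (hdom : ∀ q : Int, 0 ≤ q → q < (xs.length : Int) → pvV xs idx < pvV xs q → q ∈ P) :
    (blowUpStep xs (d, res) idx).2 = res ++ (if pvLocB xs idx then [idx + 1] else []) ∧
    pvInv xs (P ++ [idx]) (blowUpStep xs (d, res) idx).1 ∧
    (blowUpStep xs (d, res) idx).1.length = xs.length := by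
  by_cases hd : pvGB d idx = true
  · -- idx already destroyed: skipped, and it is not a local maximum
    have hnl : ¬ pvLoc xs idx := by
      intro hloc
      rcases (hInv idx hidx0 hidxn).mp hd with ⟨_, hP⟩ | ⟨j, hj0, hjn, _, _, hc⟩
      · exact hidxP hP
      · exact pv_loc_no_chain xs idx j hidx0 hidxn hj0 hjn hloc hc
    have hstep : blowUpStep xs (d, res) idx = (d, res) := by
      simp only [blowUpStep]
      rw [if_pos (show PySem.List.pyGetD d idx false = true from hd)]
    rw [hstep]
    refine ⟨?_, ?_, hlen⟩
    · have hb : pvLocB xs idx = false := by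
        rcases Bool.eq_false_or_eq_true (pvLocB xs idx) with h | h
        · exact absurd ((pvLocB_iff xs idx).mp h) hnl
        · exact h
      simp [hb]
    · intro p hp hpn
      rw [hInv p hp hpn]
      constructor
      · rintro (⟨hlp, hPp⟩ | ⟨j, hj0, hjn, hjP, hlj, hc⟩)
        · exact Or.inl ⟨hlp, List.mem_append_left _ hPp⟩
        · exact Or.inr ⟨j, hj0, hjn, List.mem_append_left _ hjP, hlj, hc⟩
      · rintro (⟨hlp, hPp⟩ | ⟨j, hj0, hjn, hjP, hlj, hc⟩)
        · rcases List.mem_append.mp hPp with h | h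
          · exact Or.inl ⟨hlp, h⟩
          · have : p = idx := by simpa using h
            exact absurd (this ▸ hlp) hnl
        · rcases List.mem_append.mp hjP with h | h
          · exact Or.inr ⟨j, hj0, hjn, h, hlj, hc⟩
          · have : j = idx := by simpa using h
            exact absurd (this ▸ hlj) hnl
  · -- idx not destroyed: it must be a local maximum
    have hlocidx : pvLoc xs idx := by
      by_contra hnl
      have : pvGB d idx = true := by
        rw [hInv idx hidx0 hidxn]
        unfold pvLoc at hnl
        rw [Classical.not_and_iff_not_or_not] at hnl
        rcases hnl with h | h
        · push_neg at h
          obtain ⟨j, hj0, hji, hdn, hlocj⟩ :=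
            pv_exists_peak_left xs idx.toNat idx le_rfl (by omega) hidxn (by
              have := h.2; omega)
          have hvlt : pvV xs idx < pvV xs j :=
            pvDn_lt xs (idx - j).toNat j idx le_rfl hji hdn
          have hjP : j ∈ P := hdom j hj0 (by omega) hvlt
          exact Or.inr ⟨j, hj0, by omega, hjP, hlocj, Or.inr ⟨hji, hdn⟩⟩
        · push_neg at h
          obtain ⟨j, hji, hjn, hup, hlocj⟩ :=
            pv_exists_peak_right xs ((xs.length : Int) - idx).toNat idx le_rfl hidx0 (by omega) (by
              have := h.2; omega)
          have hvlt : pvV xs idx < pvV xs j :=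
            pvUp_lt xs (j - idx).toNat idx j le_rfl hji hup
          have hjP : j ∈ P := hdom j (by omega) hjn hvlt
          exact Or.inr ⟨j, by omega, hjn, hjP, hlocj, Or.inl ⟨hji, hup⟩⟩
      exact hd this
    have hstep : blowUpStep xs (d, res) idx =
        (PySem.List.pySetD (blowUpRight xs xs.length (idx + 1) (blowUpLeft xs xs.length (idx - 1) d)) idx true,
         res ++ [idx + 1]) := by
      simp only [blowUpStep]
      rw [if_neg (show ¬ PySem.List.pyGetD d idx false = true from hd)]
    obtain ⟨hlen1, Hd1⟩ := blowUpLeft_spec xs P d idx hInv hidx0 hidxn hlocidx hidxP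
      xs.length (idx - 1) d (by omega) (by omega) hlen
      (fun p hp hpn => by
        constructor
        · exact fun h => Or.inl h
        · rintro (h | h)
          · exact h
          · omega)
      (fun k hk1 hk2 => by omega)
    set d1 := blowUpLeft xs xs.length (idx - 1) d with hd1def
    obtain ⟨hlen2, Hd2⟩ := blowUpRight_spec xs P d d1 idx hInv hidx0 hidxn hlocidx hidxP
      (fun q hq1 hq2 => by
        rw [Bool.eq_iff_iff, Hd1 q (by omega) hq2]
        constructor
        · rintro (h | h)
          · exact h
          · omega
        · exact fun h => Or.inl h)
      xs.length (idx + 1) d1 (by omega) (by omega) hlen1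
      (fun p hp hpn => by
        constructor
        · exact fun h => Or.inl h
        · rintro (h | h)
          · exact h
          · omega)
      (fun k hk1 hk2 => by omega)
    set d2 := blowUpRight xs xs.length (idx + 1) d1 with hd2def
    rw [hstep]
    refine ⟨?_, ?_, ?_⟩
    · have hb : pvLocB xs idx = true := (pvLocB_iff xs idx).mpr hlocidx
      simp [hb]
    · intro p hp hpn
      have hgb : pvGB (PySem.List.pySetD d2 idx true) p = if p = idx then true else pvGB d2 p :=
        pvGB_set d2 idx p hidx0 (by omega) hp
      show pvGB (PySem.List.pySetD d2 idx true) p = true ↔ _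
      rw [hgb]
      have hLHS : (if p = idx then true else pvGB d2 p) = true ↔
          (p = idx ∨ pvGB d p = true ∨ (p < idx ∧ pvUp xs p idx) ∨ (idx < p ∧ pvDn xs idx p)) := by
        by_cases hpe : p = idx
        · simp [hpe]
        · rw [if_neg hpe, Hd2 p hp hpn, Hd1 p hp hpn]
          constructor
          · rintro ((h | h) | h)
            · exact Or.inr (Or.inl h)
            · exact Or.inr (Or.inr (Or.inl h))
            · exact Or.inr (Or.inr (Or.inr h))
          · rintro (h | h | h | h)
            · exact absurd h hpe
            · exact Or.inl (Or.inl h)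
            · exact Or.inl (Or.inr h)
            · exact Or.inr h
      rw [hLHS, hInv p hp hpn]
      have hidxmem : idx ∈ P ++ [idx] := List.mem_append_right _ (by simp)
      constructor
      · rintro (h | (⟨hlp, hPp⟩ | ⟨j, hj0, hjn, hjP, hlj, hc⟩) | h | h)
        · exact Or.inl ⟨h ▸ hlocidx, h ▸ hidxmem⟩
        · exact Or.inl ⟨hlp, List.mem_append_left _ hPp⟩
        · exact Or.inr ⟨j, hj0, hjn, List.mem_append_left _ hjP, hlj, hc⟩
        · exact Or.inr ⟨idx, hidx0, hidxn, hidxmem, hlocidx, Or.inl h⟩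
        · exact Or.inr ⟨idx, hidx0, hidxn, hidxmem, hlocidx, Or.inr h⟩
      · rintro (⟨hlp, hPp⟩ | ⟨j, hj0, hjn, hjP, hlj, hc⟩)
        · rcases List.mem_append.mp hPp with h | h
          · exact Or.inr (Or.inl (Or.inl ⟨hlp, h⟩))
          · exact Or.inl (by simpa using h)
        · rcases List.mem_append.mp hjP with h | h
          · exact Or.inr (Or.inl (Or.inr ⟨j, hj0, hjn, h, hlj, hc⟩))
          · have hje : j = idx := by simpa using h
            subst hje
            rcases hc with h | h
            · exact Or.inr (Or.inr (Or.inl h))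
            · exact Or.inr (Or.inr (Or.inr h))
    · rw [PySem.List.pySetD_of_nonneg _ _ hidx0, List.length_set]
      exact hlen2

-- the whole loop appends exactly the local maxima of the processed suffix, in processing order
theorem blowUp_fold (xs : List Int) (S : List Int)
    (hnd : S.Nodup)
    (hmem : ∀ i ∈ S, 0 ≤ i ∧ i < (xs.length : Int))
    (hpair : S.Pairwise (fun a b => pvV xs b ≤ pvV xs a))
    (hall : ∀ q : Int, 0 ≤ q → q < (xs.length : Int) → q ∈ S) :
    ∀ R P : List Int, ∀ d : List Bool, ∀ res : List Int,
    S = P ++ R → pvInv xs P d → d.length = xs.length →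
    (R.foldl (blowUpStep xs) (d, res)).2 = res ++ (R.filter (pvLocB xs)).map (fun i => i + 1) := by
  intro R
  induction R with
  | nil => intro P d res _ _ _; simp
  | cons idx R' ih =>
    intro P d res hS hInv hlen
    have hidxS : idx ∈ S := by rw [hS]; simp
    obtain ⟨hidx0, hidxn⟩ := hmem idx hidxS
    have hnd' := hnd
    rw [hS, List.nodup_append] at hnd'
    obtain ⟨_, _, hdisj⟩ := hnd'
    have hidxP : idx ∉ P := fun hmemP => (hdisj idx hmemP idx (by simp)) rfl
    have hpair' := hpair
    rw [hS, List.pairwise_append] at hpair'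
    obtain ⟨_, hp2, _⟩ := hpair'
    have hRle : ∀ b ∈ R', pvV xs b ≤ pvV xs idx := (List.pairwise_cons.mp hp2).1
    have hdom : ∀ q : Int, 0 ≤ q → q < (xs.length : Int) → pvV xs idx < pvV xs q → q ∈ P := by
      intro q hq0 hqn hv
      have hqS := hall q hq0 hqn
      rw [hS] at hqS
      rcases List.mem_append.mp hqS with h | h
      · exact h
      · rcases List.mem_cons.mp h with h | h
        · subst h; omega
        · have := hRle q h; omega
    obtain ⟨h2, hInv', hlen'⟩ := blowUpStep_spec xs P d res idx hInv hlen hidx0 hidxn hidxP hdom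
    have hfold : ((idx :: R').foldl (blowUpStep xs) (d, res)).2
        = (R'.foldl (blowUpStep xs) (blowUpStep xs (d, res) idx)).2 := rfl
    rw [hfold]
    have hpair'' : blowUpStep xs (d, res) idx = ((blowUpStep xs (d, res) idx).1, (blowUpStep xs (d, res) idx).2) := rfl
    rw [hpair'', h2,
      ih (P ++ [idx]) (blowUpStep xs (d, res) idx).1 (res ++ (if pvLocB xs idx then [idx + 1] else []))
        (by rw [hS, List.append_assoc]; rfl) hInv' hlen']
    by_cases hb : pvLocB xs idx
    · simp [List.filter_cons, hb, List.append_assoc]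
    · simp only [Bool.not_eq_true] at hb
      simp [List.filter_cons, hb]

theorem pvInv_nil (xs : List Int) : pvInv xs [] (List.replicate xs.length false) := by
  intro p hp hpn
  constructor
  · intro h
    exfalso
    rw [pvGB, PySem.List.pyGetD_of_nonneg _ _ hp, List.getD_eq_getElem?_getD,
      List.getElem?_replicate] at h
    by_cases hlt : p.toNat < xs.length
    · simp [hlt] at h
    · simp [hlt] at h
  · rintro (⟨_, h⟩ | ⟨j, _, _, h, _, _⟩) <;> simp at h

-- ===== VERDICT (by name: the statement is the Claim_ definition above) =====
theorem blowUp_spec : Claim_equal_blowUp := by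
  intro inArr _
  show blowUp inArr = blowUp_alt inArr
  have hperm : (PySem.List.sorted (PySem.List.pyRange 0 (inArr.length : Int) 1)
      (fun x => -(PySem.List.pyGetD inArr x 0)) false).Perm (PySem.List.pyRange 0 (inArr.length : Int) 1) :=
    PySem.List.sorted_perm _ _ _
  set S := PySem.List.sorted (PySem.List.pyRange 0 (inArr.length : Int) 1)
      (fun x => -(PySem.List.pyGetD inArr x 0)) false with hSdef
  have hnd : S.Nodup := hperm.nodup_iff.mpr (PySem.List.nodup_pyRange_one 0 _)
  have hmem : ∀ i ∈ S, 0 ≤ i ∧ i < (inArr.length : Int) := by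
    intro i hi
    have := hperm.mem_iff.mp hi
    rw [PySem.List.mem_pyRange_one] at this
    exact this
  have hpairkey := PySem.List.sorted_pairwise (PySem.List.pyRange 0 (inArr.length : Int) 1)
      (fun x => -(PySem.List.pyGetD inArr x 0))
  have hpair : S.Pairwise (fun a b => pvV inArr b ≤ pvV inArr a) := by
    refine hpairkey.imp ?_
    intro a b h
    simp only [pvV]
    omega
  have hall : ∀ q : Int, 0 ≤ q → q < (inArr.length : Int) → q ∈ S := by
    intro q hq0 hqn
    rw [hperm.mem_iff, PySem.List.mem_pyRange_one]
    exact ⟨hq0, hqn⟩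
  have hfold := blowUp_fold inArr S hnd hmem hpair hall S [] (List.replicate inArr.length false) []
    (List.nil_append S).symm (pvInv_nil inArr) (List.length_replicate)
  show PySem.List.sorted (S.foldl (blowUpStep inArr) (List.replicate inArr.length false, [])).2
      (fun x => x) false = blowUp_alt inArr
  rw [hfold]
  simp only [List.nil_append]
  have halt : blowUp_alt inArr =
      ((PySem.List.pyRange 0 (inArr.length : Int) 1).filter (pvLocB inArr)).map (fun i => i + 1) := rfl
  rw [halt]
  apply PySem.List.sorted_eq_of_perm_of_pairwise_lt
  · exact (hperm.symm.filter _).map _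
  · have h1 : ((PySem.List.pyRange 0 (inArr.length : Int) 1).filter (pvLocB inArr)).Pairwise (· < ·) :=
      (PySem.List.pairwise_lt_pyRange_one 0 _).filter _
    rw [List.pairwise_map]
    exact h1.imp (fun h => by omega)
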